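-- pv_equiv track=rewrite | github.com/serenayj/PyrEval | Preprocess/sbar.py | Rule_SBAR
-- ===== SOURCE A (Python) =====
-- def Difference(list1, list2):
-- 	diff = list(set(list2)-set(list1))
-- 	cover = list(set(list1).intersection(set(list2)))
-- 	#print "cover, ", cover
-- 	return diff,cover
--
-- def Find_Words(ids, numlist):
-- 	sent = []
-- 	for item in ids:
-- 		for j in numlist:
-- 			if j[1] == item:
-- 				sent.append(j[0])
-- 	sents = " ".join(sent)
-- 	return sents
--
-- def Rule_SBAR(valid_sbar,numlist):
-- 	# Step 1: Pull out each segment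
-- 	#valid_sbar.sort(key=len)
-- 	valids = []
-- 	for each in valid_sbar:
-- 		ele = [item[1] for item in each]
-- 		valids.append(ele)
-- 	lst2 = [item[1] for item in numlist]
-- 	ind = 0
-- 	segments = []
-- 	valids = sorted(valids,key=len)
-- 	while ind < len(valids):
-- 		#print "current lst2, ", lst2
-- 		#print "current valids, ", valids[ind]
-- 		lst2,cover = Difference(valids[ind],lst2)
-- 		segments.append(sorted(cover))
-- 		ind += 1
-- 	segments.append(sorted(lst2))
-- 	# Step2: Pull out words from segment
-- 	ind = 0
-- 	segt = []
-- 	for seg in segments: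
-- 		segt.append(Find_Words(seg, numlist))
-- 	# return segment, and segment id
-- 	return segt, segments
-- ===== SOURCE B (Python) =====
-- def Rule_SBAR(valid_sbar, numlist):
--     valids = sorted(([item[1] for item in each] for each in valid_sbar), key=len)
--     n = len(valids)
--     owner = {}
--     for i, v in enumerate(valids):
--         for x in v:
--             owner.setdefault(x, i)
--     uniq = list(dict.fromkeys(x for _, x in numlist))
--     segments = [sorted([x for x in uniq if owner.get(x, n) == i]) for i in range(n + 1)]
--     words = {}
--     for w, x in numlist:
--         words.setdefault(x, []).append(w)
--     segt = [" ".join(w for x in seg for w in words[x]) for seg in segments]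
--     return segt, segments
-- ===== Notes on version B (the rewrite author's own statement) =====
-- stated objective: faster
-- what changed: Replaces A's repeated set-difference passes over the remaining ids and Find_Words' rescan of numlist for every id of every segment by a single first-claim ownership index over the length-sorted valids plus a words dictionary built in one pass over numlist.
-- intended difference: When valid_sbar is empty and numlist repeats an id, A never converts lst2 to a set and returns the single segment with the duplicate ids (repeating the words accordingly); B returns the deduplicated segment, which is the intended value and consistent with A's own behaviour whenever valid_sbar is non-empty. — e.g. on Rule_SBAR([], [("a", 1), ("b", 1)]): A returns (["a b a b"], [[1, 1]]), B returns (["a b"], [[1]])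
import Mathlib
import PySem

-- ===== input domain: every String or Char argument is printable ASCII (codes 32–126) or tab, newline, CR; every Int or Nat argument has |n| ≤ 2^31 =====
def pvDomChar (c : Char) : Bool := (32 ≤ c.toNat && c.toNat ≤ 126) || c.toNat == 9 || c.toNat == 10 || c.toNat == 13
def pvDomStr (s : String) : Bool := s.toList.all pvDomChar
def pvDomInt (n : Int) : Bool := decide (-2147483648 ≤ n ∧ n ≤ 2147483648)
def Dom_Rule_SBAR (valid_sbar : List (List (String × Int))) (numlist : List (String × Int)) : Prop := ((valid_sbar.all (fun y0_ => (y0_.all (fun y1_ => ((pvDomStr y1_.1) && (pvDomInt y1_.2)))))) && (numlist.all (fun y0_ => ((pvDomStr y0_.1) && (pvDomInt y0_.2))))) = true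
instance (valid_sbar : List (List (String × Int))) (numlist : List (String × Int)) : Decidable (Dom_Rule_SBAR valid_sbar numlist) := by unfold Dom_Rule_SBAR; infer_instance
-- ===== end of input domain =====

-- B replaces A's repeated set-difference passes and per-id rescans of numlist by a first-claim
-- ownership index plus a words dictionary built once (objective: faster).

-- ===== PORT A =====
-- list(set ...) appears in Python in hash order; here in first-occurrence order. Rule_SBAR consumes
-- these lists only through sorted() and set() (membership), so its value does not depend on that order.
def pvDifference (list1 : List Int) (list2 : List Int) : List Int × List Int :=
  (PySem.Set.diff (PySem.Set.ofList list2) (PySem.Set.ofList list1),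
   PySem.Set.inter (PySem.Set.ofList list1) (PySem.Set.ofList list2))

def pvFindWords (ids : List Int) (numlist : List (String × Int)) : String :=
  PySem.Str.join " "
    (ids.foldl (fun sent item =>
      numlist.foldl (fun sent j => if j.2 == item then sent ++ [j.1] else sent) sent) [])

def Rule_SBAR (valid_sbar : List (List (String × Int))) (numlist : List (String × Int)) : List String × List (List Int) :=
  let valids := valid_sbar.foldl (fun acc each => acc ++ [each.map (fun item => item.2)]) []
  let lst2 := numlist.map (fun item => item.2)
  let valids := PySem.List.sorted valids (fun l => l.length)
  let st := valids.foldl (fun (st : List Int × List (List Int)) v =>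
      let dc := pvDifference v st.1
      (dc.1, st.2 ++ [PySem.List.sorted dc.2 (fun x => x)])) (lst2, [])
  let segments := st.2 ++ [PySem.List.sorted st.1 (fun x => x)]
  let segt := segments.foldl (fun segt seg => segt ++ [pvFindWords seg numlist]) []
  (segt, segments)

-- ===== PORT B =====
def Rule_SBAR_alt (valid_sbar : List (List (String × Int))) (numlist : List (String × Int)) : List String × List (List Int) :=
  let valids := PySem.List.sorted (valid_sbar.map (fun each => each.map (fun item => item.2))) (fun l => l.length)
  let n := valids.length
  let owner := (PySem.List.enumerate valids).foldl
      (fun d iv => iv.2.foldl (fun d x => PySem.Dict.setdefault d x iv.1) d) PySem.Dict.empty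
  let uniq := PySem.List.dedup (numlist.map (fun p => p.2))
  let segments := (PySem.List.pyRange 0 ((n : Int) + 1) 1).map (fun i =>
      PySem.List.sorted (uniq.filter (fun x => PySem.Dict.getD owner x (n : Int) == i)) (fun x => x))
  let words := numlist.foldl (fun d p => PySem.Dict.modify d p.2 [] (fun l => l ++ [p.1])) PySem.Dict.empty
  let segt := segments.map (fun seg => PySem.Str.join " " (seg.flatMap (fun x => PySem.Dict.getD words x [])))
  (segt, segments)

-- ===== PRECONDITION & SPEC =====
-- When valid_sbar is empty and numlist repeats an id, A never converts lst2 to a set, so its single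
-- segment keeps the duplicate ids (and its word string repeats every word once per duplicate); B
-- returns the deduplicated segment, the intended value, consistent with A's own output whenever
-- valid_sbar is non-empty.
def D_Rule_SBAR (valid_sbar : List (List (String × Int))) (numlist : List (String × Int)) : Prop :=
  valid_sbar = [] ∧ ¬ (numlist.map (fun p => p.2)).Nodup
instance (valid_sbar : List (List (String × Int))) (numlist : List (String × Int)) : Decidable (D_Rule_SBAR valid_sbar numlist) := by unfold D_Rule_SBAR; infer_instance

def Spec_Rule_SBAR (valid_sbar : List (List (String × Int))) (numlist : List (String × Int)) (out : List String × List (List Int)) : Prop := ¬ D_Rule_SBAR valid_sbar numlist → out = Rule_SBAR_alt valid_sbar numlist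
instance (valid_sbar : List (List (String × Int))) (numlist : List (String × Int)) (out : List String × List (List Int)) : Decidable (Spec_Rule_SBAR valid_sbar numlist out) := by unfold Spec_Rule_SBAR; infer_instance

def pvDiffWitness_Rule_SBAR : (List (List (String × Int))) × (List (String × Int)) :=
  ([], [("a", 1), ("b", 1)])
def pvDiffWitnessOut_Rule_SBAR : (List String × List (List Int)) × (List String × List (List Int)) :=
  ((["a b a b"], [[1, 1]]), (["a b"], [[1]]))

-- ===== CLAIM (what is proved, stated in full; the proofs are below) =====
def Claim_unchanged_Rule_SBAR : Prop := ∀ (valid_sbar : List (List (String × Int))) (numlist : List (String × Int)), Dom_Rule_SBAR valid_sbar numlist → Spec_Rule_SBAR valid_sbar numlist (Rule_SBAR valid_sbar numlist)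
def Claim_changed_Rule_SBAR : Prop := Dom_Rule_SBAR (pvDiffWitness_Rule_SBAR.1) (pvDiffWitness_Rule_SBAR.2) ∧ D_Rule_SBAR (pvDiffWitness_Rule_SBAR.1) (pvDiffWitness_Rule_SBAR.2) ∧ Rule_SBAR (pvDiffWitness_Rule_SBAR.1) (pvDiffWitness_Rule_SBAR.2) = pvDiffWitnessOut_Rule_SBAR.1 ∧ Rule_SBAR_alt (pvDiffWitness_Rule_SBAR.1) (pvDiffWitness_Rule_SBAR.2) = pvDiffWitnessOut_Rule_SBAR.2 ∧ pvDiffWitnessOut_Rule_SBAR.1 ≠ pvDiffWitnessOut_Rule_SBAR.2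
def Claim_exact_Rule_SBAR : Prop := ∀ (valid_sbar : List (List (String × Int))) (numlist : List (String × Int)), Dom_Rule_SBAR valid_sbar numlist → D_Rule_SBAR valid_sbar numlist → Rule_SBAR valid_sbar numlist ≠ Rule_SBAR_alt valid_sbar numlist

-- ===== LEMMAS AND PROOFS =====

-- sorted with the identity key
def sseg (l : List Int) : List Int := PySem.List.sorted l (fun x => x)

-- index of the first length-sorted valid containing x (= vs.length if none does)
def fidx (vs : List (List Int)) (x : Int) : Nat :=
  match vs with
  | [] => 0
  | v :: rest => if x ∈ v then 0 else fidx rest x + 1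

-- A's segment list, written as a recursion over the sorted valids
def segsOfA (vs : List (List Int)) (S : List Int) : List (List Int) :=
  match vs with
  | [] => [sseg S]
  | v :: rest =>
      sseg (PySem.Set.inter (PySem.Set.ofList v) (PySem.Set.ofList S)) ::
      segsOfA rest (PySem.Set.diff (PySem.Set.ofList S) (PySem.Set.ofList v))

theorem foldlA_eq_segsOfA (vs : List (List Int)) (S : List Int) (segs : List (List Int)) :
    (vs.foldl (fun (st : List Int × List (List Int)) v =>
        let dc := pvDifference v st.1
        (dc.1, st.2 ++ [PySem.List.sorted dc.2 (fun x => x)])) (S, segs)).2 ++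
      [PySem.List.sorted (vs.foldl (fun (st : List Int × List (List Int)) v =>
        let dc := pvDifference v st.1
        (dc.1, st.2 ++ [PySem.List.sorted dc.2 (fun x => x)])) (S, segs)).1 (fun x => x)] =
      segs ++ segsOfA vs S := by
  induction vs generalizing S segs with
  | nil => simp [segsOfA, sseg]
  | cons v rest ih =>
      simp only [List.foldl_cons]
      rw [ih]
      simp [segsOfA, pvDifference, sseg]

theorem sseg_congr (l1 l2 : List Int) (h1 : l1.Nodup) (h2 : l2.Nodup)
    (h : ∀ x, x ∈ l1 ↔ x ∈ l2) : sseg l1 = sseg l2 := by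
  have hperm : l2.Perm l1 := by
    rw [List.perm_ext_iff_of_nodup h2 h1]; intro x; exact (h x).symm
  have hp : (sseg l2).Perm l1 := (PySem.List.sorted_perm l2 (fun x => x) false).trans hperm
  have hnd : (sseg l2).Nodup := ((PySem.List.sorted_perm l2 (fun x => x) false).nodup_iff).mpr h2
  have hle : (sseg l2).Pairwise (fun a b => a ≤ b) := PySem.List.sorted_pairwise l2 (fun x => x)
  have hlt : (sseg l2).Pairwise (fun a b : Int => a < b) := by
    exact (hle.and hnd).imp (fun hab => lt_of_le_of_ne hab.1 hab.2)
  exact PySem.List.sorted_eq_of_perm_of_pairwise_lt l1 (sseg l2) (fun x => x) hp hlt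

theorem fidx_le (vs : List (List Int)) (x : Int) : fidx vs x ≤ vs.length := by
  induction vs with
  | nil => simp [fidx]
  | cons v rest ih =>
      by_cases h : x ∈ v
      · simp [fidx, h]
      · simp [fidx, h]; omega

theorem segsOfA_dedup (v : List Int) (rest : List (List Int)) (S : List Int) :
    segsOfA (v :: rest) S = segsOfA (v :: rest) (PySem.List.dedup S) := by
  simp [segsOfA, PySem.List.dedup, PySem.Set.ofList_ofList]

theorem segsOfA_eq_buckets (vs : List (List Int)) (U : List Int) (hU : U.Nodup) :
    segsOfA vs U =
      (List.range (vs.length + 1)).map (fun i => sseg (U.filter (fun x => fidx vs x == i))) := by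
  induction vs generalizing U with
  | nil =>
      simp [segsOfA, fidx, List.range_succ]
  | cons v rest ih =>
      have hofU : PySem.Set.ofList U = U := PySem.Set.ofList_eq_self_of_nodup U hU
      have hdiff : PySem.Set.diff (PySem.Set.ofList U) (PySem.Set.ofList v)
          = U.filter (fun x => !(decide (x ∈ v))) := by
        rw [hofU]
        unfold PySem.Set.diff
        apply List.filter_congr
        intro x _
        simp
      have hhead : sseg (PySem.Set.inter (PySem.Set.ofList v) (PySem.Set.ofList U))
          = sseg (U.filter (fun x => fidx (v :: rest) x == 0)) := by
        apply sseg_congr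
        · rw [hofU]; exact PySem.Set.nodup_inter (PySem.Set.ofList v) U (PySem.Set.nodup_ofList v)
        · exact hU.filter _
        · intro x
          rw [hofU]
          constructor
          · intro hx
            have := (PySem.Set.mem_inter (PySem.Set.ofList v) U x).mp hx
            refine List.mem_filter.mpr ⟨this.2, ?_⟩
            simp [fidx, (PySem.Set.mem_ofList v x).mp this.1]
          · intro hx
            rcases List.mem_filter.mp hx with ⟨hxU, hf⟩
            by_cases hv : x ∈ v
            · exact (PySem.Set.mem_inter (PySem.Set.ofList v) U x).mpr ⟨(PySem.Set.mem_ofList v x).mpr hv, hxU⟩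
            · simp [fidx, hv] at hf
      have htail : ∀ i, U.filter (fun x => fidx (v :: rest) x == i + 1)
          = (U.filter (fun x => !(decide (x ∈ v)))).filter (fun x => fidx rest x == i) := by
        intro i
        rw [List.filter_filter]
        apply List.filter_congr
        intro x _
        by_cases hv : x ∈ v <;> simp [fidx, hv]
      rw [segsOfA, hhead, hdiff, ih _ (hU.filter _)]
      conv_rhs => rw [show (v :: rest).length + 1 = rest.length + 1 + 1 from rfl,
        List.range_succ_eq_map]
      rw [List.map_cons, List.map_map]
      congr 1
      apply List.map_congr_left
      intro i _
      simp only [Function.comp_apply]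
      rw [htail i]

theorem setdefault_fold_get? (v : List Int) (d : PySem.Dict Int Int) (i : Int) (x : Int) :
    (v.foldl (fun d y => PySem.Dict.setdefault d y i) d).get? x =
      ((d.get? x).orElse (fun _ => if x ∈ v then some i else none)) := by
  induction v generalizing d with
  | nil => simp
  | cons y t ih =>
      simp only [List.foldl_cons, ih]
      by_cases hxy : x = y
      · subst hxy
        rw [PySem.Dict.get?_setdefault_self]
        cases hdx : d.get? x <;> simp
      · rw [PySem.Dict.get?_setdefault_of_ne d i hxy]
        by_cases hm : x ∈ t <;> simp [hm, hxy]

theorem owner_fold_get? (vs : List (List Int)) (d : PySem.Dict Int Int) (s : Int) (x : Int) :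
    ((PySem.List.enumerate vs s).foldl
        (fun d iv => iv.2.foldl (fun d x => PySem.Dict.setdefault d x iv.1) d) d).get? x =
      ((d.get? x).orElse (fun _ =>
        if fidx vs x < vs.length then some (s + (fidx vs x : Int)) else none)) := by
  induction vs generalizing d s with
  | nil => simp [PySem.List.enumerate_nil, fidx]
  | cons v rest ih =>
      rw [PySem.List.enumerate_cons]
      simp only [List.foldl_cons, ih, setdefault_fold_get?]
      by_cases hm : x ∈ v
      · cases hdx : d.get? x <;> simp [fidx, hm]
      · have h1 : fidx (v :: rest) x = fidx rest x + 1 := by simp [fidx, hm]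
        cases hdx : d.get? x with
        | some w => simp
        | none =>
            simp only [Option.orElse, hm, if_false, h1]
            by_cases hlt : fidx rest x < rest.length
            · have h2 : fidx rest x + 1 < (v :: rest).length := by simp; omega
              simp [hlt]
              ring
            · have h2 : ¬ (fidx rest x + 1 < (v :: rest).length) := by simp; omega
              simp [hlt]

theorem owner_getD (vs : List (List Int)) (x : Int) :
    PySem.Dict.getD ((PySem.List.enumerate vs).foldl
        (fun d iv => iv.2.foldl (fun d x => PySem.Dict.setdefault d x iv.1) d) PySem.Dict.empty)
      x (vs.length : Int) = (fidx vs x : Int) := by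
  rw [PySem.Dict.getD_eq_get?_getD, owner_fold_get?]
  simp only [PySem.Dict.get?_empty]
  by_cases hlt : fidx vs x < vs.length
  · simp [hlt]
  · have h2 : fidx vs x = vs.length := le_antisymm (fidx_le vs x) (by omega)
    simp [h2]

theorem words_getD (nl : List (String × Int)) (x : Int) :
    PySem.Dict.getD (nl.foldl (fun d p => PySem.Dict.modify d p.2 [] (fun l => l ++ [p.1]))
        PySem.Dict.empty) x [] =
      (nl.filter (fun j => j.2 == x)).map (fun j => j.1) := by
  have h : nl.foldl (fun d p => PySem.Dict.modify d p.2 [] (fun l => l ++ [p.1])) PySem.Dict.empty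
      = (nl.map (fun p => (p.2, p.1))).foldl
          (fun d q => PySem.Dict.modify d q.1 [] (fun l => l ++ [q.2])) PySem.Dict.empty := by
    rw [List.foldl_map]
  rw [h, PySem.Dict.getD_foldl_modify_append]
  simp [List.filter_map, List.map_map, Function.comp_def]

theorem findWords_eq (seg : List Int) (nl : List (String × Int)) :
    pvFindWords seg nl =
      PySem.Str.join " " (seg.flatMap (fun x => (nl.filter (fun j => j.2 == x)).map (fun j => j.1))) := by
  unfold pvFindWords
  congr 1
  simp only [PySem.List.foldl_append_if]
  rw [PySem.List.foldl_append_eq_flatMap]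
  simp

theorem segsA_eq_segsB (V : List (List Int)) (ids : List Int) (h : V = [] → ids.Nodup) :
    segsOfA V ids =
      (List.range (V.length + 1)).map
        (fun i => sseg ((PySem.List.dedup ids).filter (fun x => fidx V x == i))) := by
  cases V with
  | nil =>
      have hids : PySem.Set.ofList ids = ids := PySem.Set.ofList_eq_self_of_nodup ids (h rfl)
      simp [segsOfA, fidx, List.range_succ, PySem.List.dedup, hids]
  | cons v rest =>
      rw [segsOfA_dedup, segsOfA_eq_buckets]
      simp [PySem.List.dedup, PySem.Set.nodup_ofList]

theorem ofList_sublist_self (xs : List Int) : (PySem.Set.ofList xs).Sublist xs := by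
  induction xs using List.reverseRecOn with
  | nil => simp [PySem.Set.ofList]
  | append_singleton t x ih =>
      rw [PySem.Set.ofList_append_singleton]
      by_cases h : x ∈ PySem.Set.ofList t
      · exact (PySem.Set.add_of_mem h).symm ▸ ih.trans (List.sublist_append_left t [x])
      · rw [PySem.Set.add_of_not_mem h]
        exact ih.append (List.Sublist.refl [x])

theorem ofList_length_lt (xs : List Int) (h : ¬ xs.Nodup) :
    (PySem.Set.ofList xs).length < xs.length := by
  refine lt_of_le_of_ne (ofList_sublist_self xs).length_le (fun he => h ?_)
  rw [← (ofList_sublist_self xs).eq_of_length he]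
  exact PySem.Set.nodup_ofList xs

theorem ruleA_nil (nl : List (String × Int)) :
    (Rule_SBAR [] nl).2 = [PySem.List.sorted (nl.map (fun item => item.2)) (fun x => x)] := by
  simp [Rule_SBAR, PySem.List.sorted]

theorem ruleB_nil (nl : List (String × Int)) :
    (Rule_SBAR_alt [] nl).2 =
      [PySem.List.sorted (PySem.List.dedup (nl.map (fun p => p.2))) (fun x => x)] := by
  simp [Rule_SBAR_alt, PySem.List.sorted, PySem.Dict.getD,
    PySem.Dict.get?, PySem.Dict.empty]
  exact ⟨0, by decide, by simp⟩

-- ===== VERDICT (by name: the statement is the Claim_ definition above) =====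
theorem Rule_SBAR_spec : Claim_unchanged_Rule_SBAR := by
  intro vsb nl _hdom
  unfold Spec_Rule_SBAR
  intro hnD
  unfold Rule_SBAR Rule_SBAR_alt
  simp only [PySem.List.foldl_append_singleton_eq_map, List.nil_append]
  set V := PySem.List.sorted (vsb.map (fun each => each.map (fun item => item.2))) (fun l => l.length) with hV
  set ids := nl.map (fun item => item.2) with hids
  have hVnil : V = [] → ids.Nodup := by
    intro hVe
    have hvsb : vsb = [] := by
      have := congrArg List.length hVe
      rw [hV, PySem.List.length_sorted, List.length_map] at this
      exact List.eq_nil_of_length_eq_zero this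
    by_contra hnodup
    exact hnD ⟨hvsb, hnodup⟩
  have hsegs : segsOfA V ids =
      (PySem.List.pyRange 0 ((V.length : Int) + 1) 1).map (fun i =>
        PySem.List.sorted ((PySem.List.dedup ids).filter (fun x =>
          PySem.Dict.getD ((PySem.List.enumerate V).foldl
            (fun d iv => iv.2.foldl (fun d x => PySem.Dict.setdefault d x iv.1) d) PySem.Dict.empty)
            x (V.length : Int) == i)) (fun x => x)) := by
    rw [show ((V.length : Int) + 1) = ((V.length + 1 : Nat) : Int) by push_cast; ring,
      PySem.List.pyRange_zero_nat, List.map_map]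
    rw [segsA_eq_segsB V ids hVnil]
    apply List.map_congr_left
    intro i _
    simp only [Function.comp, sseg]
    congr 1
    apply List.filter_congr
    intro x _
    rw [owner_getD]
    simp
  rw [foldlA_eq_segsOfA, List.nil_append, hsegs]
  refine Prod.ext ?_ ?_
  · dsimp only
    apply List.map_congr_left
    intro seg _
    rw [findWords_eq]
    congr 1
    congr 1
    funext x
    rw [words_getD]
  · rfl

theorem Rule_SBAR_changed : Claim_changed_Rule_SBAR := by
  unfold Claim_changed_Rule_SBAR; decide

theorem Rule_SBAR_tight : Claim_exact_Rule_SBAR := by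
  intro vsb nl _hdom hD heq
  obtain ⟨hv, hnd⟩ := hD
  subst hv
  have h2 := congrArg Prod.snd heq
  rw [ruleA_nil nl, ruleB_nil nl] at h2
  have h4 : PySem.List.sorted (nl.map (fun item => item.2)) (fun x => x) =
      PySem.List.sorted (PySem.List.dedup (nl.map (fun p => p.2))) (fun x => x) := by
    simpa using h2
  have h5 := congrArg List.length h4
  rw [PySem.List.length_sorted, PySem.List.length_sorted] at h5
  have h6 := ofList_length_lt (nl.map (fun p => p.2)) hnd
  simp [PySem.List.dedup] at h5
  simp at h6
  omega
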